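-- pv_equiv track=rewrite | github.com/tmnhut101002/hdoop | his_model/clustering_noHDFS/create_user_item_matrix.py | mapValueResult
-- ===== SOURCE A (Python) =====
-- def mapValueResult(x):
--     user_avg = x[0]
--     item_rating = x[1]
--     result_list, real_rating = item_rating[0], item_rating[1]
--
--     for i in range(len(real_rating)):
--         for j in range(len(result_list)):
--             if str(result_list[j]) == str(real_rating[i]):
--                 result_list[j] = str(result_list[j])  + ";" + str(real_rating[i+1])
--
--     for i in range(len(result_list)):
--         a = str(result_list[i]).split(';')
--         if len(a) == 1:
--             result_list[i]= str(result_list[i]) +';'+ str(user_avg[1])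
--
--     return  ((user_avg[0]), '|'.join(result_list))
-- ===== SOURCE B (Python) =====
-- def mapValueResult(x):
--     user_avg = x[0]
--     result_list, real_rating = x[1]
--     # one pass over real_rating: first-occurrence value -> next element
--     nxt = {}
--     for i in range(len(real_rating) - 1):
--         v = real_rating[i]
--         if v not in nxt:
--             nxt[v] = real_rating[i + 1]
--     # one annotation pass over result_list (in place, as A mutates it)
--     for j, s in enumerate(result_list):
--         if s in nxt:
--             result_list[j] = s + ";" + nxt[s]
--         elif ";" not in s:
--             result_list[j] = s + ";" + user_avg[1]
--     return (user_avg[0], "|".join(result_list))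
-- ===== Notes on version B (the rewrite author's own statement) =====
-- stated objective: faster
-- what changed: Replaces the nested scan (every rating compared against every result item, mutating in place) by a dictionary built in one pass over real_rating mapping each first-occurring value to its successor, followed by a single annotation pass over result_list.
import Mathlib
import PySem

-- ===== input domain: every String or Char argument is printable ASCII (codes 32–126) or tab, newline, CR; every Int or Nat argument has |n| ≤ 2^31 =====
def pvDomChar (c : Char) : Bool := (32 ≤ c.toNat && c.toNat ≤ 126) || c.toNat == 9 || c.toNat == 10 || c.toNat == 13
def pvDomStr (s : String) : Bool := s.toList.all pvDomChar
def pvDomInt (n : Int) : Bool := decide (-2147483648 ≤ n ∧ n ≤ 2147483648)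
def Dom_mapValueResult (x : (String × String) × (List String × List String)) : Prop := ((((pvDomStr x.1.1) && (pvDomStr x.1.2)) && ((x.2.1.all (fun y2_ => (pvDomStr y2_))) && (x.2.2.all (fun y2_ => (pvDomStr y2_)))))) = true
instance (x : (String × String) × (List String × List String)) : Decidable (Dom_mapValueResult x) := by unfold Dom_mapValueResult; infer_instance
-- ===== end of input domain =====

-- B replaces A's nested rating-vs-item scan by a first-occurrence dictionary over real_rating plus one
-- annotation pass; equivalence is about the RETURN value (the Python A mutates result_list in place,
-- the Python B performs the corresponding in-place writes).

-- ===== PORT A =====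
def mapValueResult (x : (String × String) × (List String × List String)) : String × String :=
  let user_avg := x.1
  let item_rating := x.2
  let result_list := item_rating.1
  let real_rating := item_rating.2
  -- for i in range(len(real_rating)): for j in range(len(result_list)): …
  let rl1 := (PySem.List.pyRange 0 (real_rating.length : Int) 1).foldl (fun rl i =>
      (PySem.List.pyRange 0 (rl.length : Int) 1).foldl (fun rl' j =>
        if PySem.List.pyGetD rl' j "" == PySem.List.pyGetD real_rating i "" then
          -- real_rating[i+1] raises IndexError when i is the last index: excluded by Pre_
          PySem.List.pySetD rl' j (PySem.List.pyGetD rl' j "" ++ ";" ++ PySem.List.pyGetD real_rating (i + 1) "")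
        else rl') rl) result_list
  -- for i in range(len(result_list)): a = result_list[i].split(';'); if len(a) == 1: …
  let rl2 := (PySem.List.pyRange 0 (rl1.length : Int) 1).foldl (fun rl i =>
      if ((PySem.Str.split? (PySem.List.pyGetD rl i "") ";").getD []).length == 1 then
        PySem.List.pySetD rl i (PySem.List.pyGetD rl i "" ++ ";" ++ user_avg.2)
      else rl) rl1
  (user_avg.1, PySem.Str.join "|" rl2)

-- ===== PORT B =====
def mapValueResult_alt (x : (String × String) × (List String × List String)) : String × String :=
  let user_avg := x.1
  let result_list := x.2.1
  let real_rating := x.2.2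
  -- one pass over real_rating: first-occurrence value -> next element
  let nxt : PySem.Dict String String :=
    (PySem.List.pyRange 0 ((real_rating.length : Int) - 1) 1).foldl (fun d i =>
      let v := PySem.List.pyGetD real_rating i ""
      if d.contains v then d else d.insert v (PySem.List.pyGetD real_rating (i + 1) "")) PySem.Dict.empty
  -- one annotation pass over result_list
  let out := result_list.map (fun s =>
      if nxt.contains s then s ++ ";" ++ nxt.getD s ""
      else if ¬ PySem.Str.isIn ";" s then s ++ ";" ++ user_avg.2
      else s)
  (user_avg.1, PySem.Str.join "|" out)

-- ===== PRECONDITION & SPEC =====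
-- Pre_ excludes exactly the inputs on which A's nested in-place scan misbehaves: a result item whose
-- first occurrence in real_rating is its final element (A raises IndexError reading real_rating[i+1]),
-- and a result item whose freshly annotated value "item;rating" re-appears among the later real_rating
-- entries, so A's mutated-in-place entry matches again and chains (or runs off the end) — a
-- separator-breaking corner of the flat [item, rating, …] format on which A and B differ and neither
-- behaviour is specified.
def Pre_mapValueResult (x : (String × String) × (List String × List String)) : Prop :=
  ∀ s ∈ x.2.1, s ∈ x.2.2 →
    x.2.2.idxOf s < x.2.2.length - 1 ∧
    (s ++ ";" ++ x.2.2.getD (x.2.2.idxOf s + 1) "") ∉ x.2.2.drop (x.2.2.idxOf s + 1)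
instance (x : (String × String) × (List String × List String)) : Decidable (Pre_mapValueResult x) := by unfold Pre_mapValueResult; infer_instance

def pvWitness_mapValueResult : ((String × String) × (List String × List String)) :=
  (("u1", "3"), (["i1", "i2"], ["i1", "5"]))

def Spec_mapValueResult (x : (String × String) × (List String × List String)) (out : String × String) : Prop := out = mapValueResult_alt x
instance (x : (String × String) × (List String × List String)) (out : String × String) : Decidable (Spec_mapValueResult x out) := by unfold Spec_mapValueResult; infer_instance

-- ===== CLAIM (what is proved, stated in full; the proofs are below) =====
def Claim_equal_mapValueResult : Prop := ∀ (x : (String × String) × (List String × List String)), Dom_mapValueResult x → Pre_mapValueResult x → Spec_mapValueResult x (mapValueResult x)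

-- ===== LEMMAS AND PROOFS =====

/-- A's in-place index loop `for j in range(len(l)): if P(l[j]): l[j] = g(l[j])` is the elementwise
update. -/
theorem foldl_set_range {α : Type} (P : α → Bool) (g : α → α) (d : α) (rl : List α) :
    (List.range rl.length).foldl
      (fun acc j => if P (acc.getD j d) then acc.set j (g (acc.getD j d)) else acc) rl
    = rl.map (fun s => if P s then g s else s) := by
  induction rl with
  | nil => simp
  | cons a t ih =>
    have hshift : ∀ (l : List Nat) (b : α) (tl : List α),
        l.foldl (fun acc j =>
          if P (acc.getD (j + 1) d) then acc.set (j + 1) (g (acc.getD (j + 1) d)) else acc) (b :: tl)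
        = b :: l.foldl (fun acc j =>
          if P (acc.getD j d) then acc.set j (g (acc.getD j d)) else acc) tl := by
      intro l
      induction l with
      | nil => intro b tl; rfl
      | cons j lt ihl =>
        intro b tl
        simp only [List.foldl_cons, List.getD_cons_succ, List.set_cons_succ]
        by_cases h : P (tl.getD j d) <;> simp only [h, if_true, if_false, ihl,
          Bool.false_eq_true]
    rw [List.length_cons, List.range_succ_eq_map]
    simp only [List.foldl_cons, List.foldl_map, List.getD_cons_zero, List.set_cons_zero,
      Nat.succ_eq_add_one, List.map_cons]
    by_cases hP : P a <;>
      simp only [hP, ite_true, ite_false, Bool.false_eq_true, hshift, ih]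

/-- A fold of elementwise maps is the map of the per-element fold. -/
theorem foldl_map_comm {α β : Type} (e : β → α → α) (idxs : List β) (l : List α) :
    idxs.foldl (fun l i => l.map (e i)) l = l.map (fun s => idxs.foldl (fun s i => e i s) s) := by
  induction idxs generalizing l with
  | nil => simp
  | cons i t ih => simp [ih, List.map_map]

/-- What A's first loop does to one string: scan real_rating left to right, on a match append ';'
and the next entry, and continue with the mutated string. -/
def chain : List String → String → String
  | [], s => s
  | v :: tl, s => chain tl (if s = v then s ++ ";" ++ tl.getD 0 "" else s)

/-- Successor of the first occurrence of s (none when s is absent or only last). -/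
def nextOf : List String → String → Option String
  | [], _ => none
  | v :: tl, s => if s = v then tl.head? else nextOf tl s

theorem range_fold_eq_chain (rr : List String) (s : String) :
    (List.range rr.length).foldl
      (fun t k => if t == rr.getD k "" then t ++ ";" ++ rr.getD (k + 1) "" else t) s
    = chain rr s := by
  induction rr generalizing s with
  | nil => simp [chain]
  | cons v tl ih =>
    rw [List.length_cons, List.range_succ_eq_map]
    simp only [List.foldl_cons, List.foldl_map, Nat.succ_eq_add_one, List.getD_cons_zero,
      List.getD_cons_succ]
    rw [ih]
    simp only [chain, beq_iff_eq]

theorem chain_of_not_mem (rr : List String) (t : String) (h : t ∉ rr) : chain rr t = t := by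
  induction rr with
  | nil => simp [chain]
  | cons v tl ih =>
    have h1 : t ≠ v := fun he => h (by simp [he])
    simp only [chain, if_neg h1]
    exact ih (fun hm => h (List.mem_cons_of_mem _ hm))

theorem nextOf_none_of_not_mem (rr : List String) (s : String) (h : s ∉ rr) :
    nextOf rr s = none := by
  induction rr with
  | nil => rfl
  | cons v tl ih =>
    have h1 : s ≠ v := fun he => h (by simp [he])
    simp only [nextOf, if_neg h1]
    exact ih (fun hm => h (List.mem_cons_of_mem _ hm))

theorem semi_mem_append (s w : String) : ';' ∈ (s ++ ";" ++ w).toList := by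
  have h : (s ++ ";" ++ w).toList = s.toList ++ [';'] ++ w.toList := by
    simp [String.toList_append]
  simp [h]

theorem chain_nextOf_of_mem (rr : List String) (s : String) (hmem : s ∈ rr)
    (hidx : rr.idxOf s < rr.length - 1)
    (hre : (s ++ ";" ++ rr.getD (rr.idxOf s + 1) "") ∉ rr.drop (rr.idxOf s + 1)) :
    chain rr s = s ++ ";" ++ rr.getD (rr.idxOf s + 1) "" ∧
      nextOf rr s = some (rr.getD (rr.idxOf s + 1) "") := by
  induction rr with
  | nil => simp at hmem
  | cons v tl ih =>
    by_cases h : s = v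
    · subst h
      rw [List.idxOf_cons_self] at hidx hre ⊢
      cases tl with
      | nil => simp at hidx
      | cons w tl' =>
        simp only [zero_add, List.getD_cons_succ, List.getD_cons_zero, List.drop_succ_cons,
          List.drop_zero] at hre ⊢
        constructor
        · simp only [chain, List.getD_cons_zero]
          exact chain_of_not_mem _ _ hre
        · simp [nextOf]
    · have hv : v ≠ s := fun he => h he.symm
      rw [List.idxOf_cons_ne _ hv] at hidx hre ⊢
      have hmem' : s ∈ tl := by
        rcases List.mem_cons.mp hmem with h1 | h2
        · exact absurd h1 h
        · exact h2
      have hidx' : tl.idxOf s < tl.length - 1 := by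
        rw [List.length_cons] at hidx
        have := List.idxOf_lt_length_iff.mpr hmem'
        omega
      simp only [List.getD_cons_succ, List.drop_succ_cons] at hre ⊢
      obtain ⟨h1, h2⟩ := ih hmem' hidx' hre
      constructor
      · simp only [chain, if_neg h]
        exact h1
      · simp only [nextOf, if_neg h]
        exact h2

theorem dictfold_get (rr : List String) (d : PySem.Dict String String) (s : String) :
    ((List.range (rr.length - 1)).foldl (fun d k =>
        if d.contains (rr.getD k "") then d
        else d.insert (rr.getD k "") (rr.getD (k + 1) "")) d).get? s
    = match d.get? s with
      | some w => some w
      | none => nextOf rr s := by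
  induction rr generalizing d with
  | nil =>
    simp only [List.length_nil, Nat.zero_sub, List.range_zero, List.foldl_nil, nextOf]
    cases d.get? s <;> rfl
  | cons v tl ih =>
    rw [List.length_cons, Nat.add_sub_cancel]
    cases tl with
    | nil =>
      simp only [List.length_nil, List.range_zero, List.foldl_nil, nextOf]
      cases hg : d.get? s with
      | none => simp
      | some w => rfl
    | cons w tl' =>
      rw [List.length_cons, List.range_succ_eq_map]
      simp only [List.foldl_cons, List.foldl_map, Nat.succ_eq_add_one, List.getD_cons_zero,
        List.getD_cons_succ]
      have ih' := ih (if d.contains v then d else d.insert v w)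
      rw [List.length_cons, Nat.add_sub_cancel] at ih'
      simp only [List.getD_cons_succ] at ih'
      rw [ih']
      by_cases hsv : s = v
      · subst hsv
        by_cases hc : d.contains s
        · simp only [hc, if_true]
          cases hg : d.get? s with
          | none =>
            exfalso
            have := (PySem.Dict.get?_eq_none_iff_contains d s).mp hg
            rw [this] at hc
            exact Bool.false_ne_true hc
          | some u => rfl
        · have hc' : d.contains s = false := by
            cases hb : d.contains s
            · rfl
            · exact absurd hb hc
          simp only [hc', Bool.false_eq_true, if_false]
          rw [PySem.Dict.get?_insert_self]
          have hg : d.get? s = none := (PySem.Dict.get?_eq_none_iff_contains d s).mpr hc'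
          rw [hg]
          simp [nextOf]
      · have hget : (if d.contains v then d else d.insert v w).get? s = d.get? s := by
          by_cases hc : d.contains v
          · simp [hc]
          · have hc' : d.contains v = false := by
              cases hb : d.contains v
              · rfl
              · exact absurd hb hc
            simp only [hc', Bool.false_eq_true, if_false]
            exact PySem.Dict.get?_insert_of_ne d w hsv
        rw [hget]
        cases hg : d.get? s with
        | none => simp [nextOf, hsv]
        | some u => rfl

theorem splitOn_go_len (l : List Char) : ∀ (fuel : Nat) (cur : List Char) (acc : List (List Char)),
    l.length < fuel →
    (PySem.Chars.splitOn.go [';'] fuel l cur acc).length = acc.length + 1 + l.count ';' := by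
  induction l with
  | nil =>
    intro fuel cur acc h
    cases fuel with
    | zero => omega
    | succ f => simp [PySem.Chars.splitOn.go]
  | cons c rest ih =>
    intro fuel cur acc h
    cases fuel with
    | zero => simp at h
    | succ f =>
      have hstep : PySem.Chars.splitOn.go [';'] (f + 1) (c :: rest) cur acc
          = if [';'].isPrefixOf (c :: rest) then
              PySem.Chars.splitOn.go [';'] f rest [] (cur.reverse :: acc)
            else PySem.Chars.splitOn.go [';'] f rest (c :: cur) acc := rfl
      rw [hstep]
      have hr : rest.length < f := by
        simp at h
        omega
      by_cases hc : c = ';'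
      · have hp : [';'].isPrefixOf (c :: rest) = true := by
          simp [List.isPrefixOf, hc]
        rw [if_pos hp, ih f [] (cur.reverse :: acc) hr]
        simp [hc]
        omega
      · have hp : [';'].isPrefixOf (c :: rest) = false := by
          simp [List.isPrefixOf]
          exact fun h' => absurd h'.symm hc
        rw [hp]
        simp only [Bool.false_eq_true, if_false]
        rw [ih f (c :: cur) acc hr]
        simp [hc]

theorem splitlen_iff (s : String) :
    (((PySem.Str.split? s ";").getD []).length = 1) ↔ ';' ∉ s.toList := by
  have hsep : (";" : String).toList = [';'] := rfl
  have hgo := splitOn_go_len s.toList (s.toList.length + 1) [] [] (by omega)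
  have hsplit : PySem.Str.split? s ";"
      = some ((PySem.Chars.splitOn s.toList [';']).map String.ofList) := by
    simp [PySem.Str.split?, PySem.Chars.split?, hsep]
  rw [hsplit]
  simp only [Option.getD_some, List.length_map]
  unfold PySem.Chars.splitOn
  rw [hgo]
  simp only [List.length_nil, Nat.zero_add]
  constructor
  · intro h
    have : s.toList.count ';' = 0 := by omega
    exact (List.count_eq_zero).mp this
  · intro h
    have : s.toList.count ';' = 0 := List.count_eq_zero.mpr h
    omega

theorem isIn_semi_iff (s : String) : PySem.Str.isIn ";" s = true ↔ ';' ∈ s.toList := by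
  rw [PySem.Str.isIn_iff_infix]
  have hsep : (";" : String).toList = [';'] := rfl
  rw [hsep]
  constructor
  · intro h
    exact List.singleton_sublist.mp h.sublist
  · intro h
    rcases List.append_of_mem h with ⟨p, q, hpq⟩
    rw [hpq]
    exact ⟨p, q, by simp⟩

/-- A's second loop on one string. -/
def annStep (u : String) (s : String) : String :=
  if ((PySem.Str.split? s ";").getD []).length == 1 then s ++ ";" ++ u else s

theorem A_eval (ua : String × String) (rl rr : List String) :
    mapValueResult (ua, (rl, rr))
    = (ua.1, PySem.Str.join "|" (rl.map (fun s => annStep ua.2 (chain rr s)))) := by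
  unfold mapValueResult
  dsimp only
  have hinner : ∀ (i : Int) (cur : List String),
      (PySem.List.pyRange 0 (cur.length : Int) 1).foldl (fun rl' j =>
        if PySem.List.pyGetD rl' j "" == PySem.List.pyGetD rr i "" then
          PySem.List.pySetD rl' j
            (PySem.List.pyGetD rl' j "" ++ ";" ++ PySem.List.pyGetD rr (i + 1) "")
        else rl') cur
      = cur.map (fun s =>
          if s == PySem.List.pyGetD rr i "" then
            s ++ ";" ++ PySem.List.pyGetD rr (i + 1) "" else s) := by
    intro i cur
    rw [PySem.List.pyRange_zero_nat, List.foldl_map]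
    simp only [PySem.List.pyGetD_natCast, PySem.List.pySetD_natCast]
    exact foldl_set_range (fun s => s == PySem.List.pyGetD rr i "")
      (fun s => s ++ ";" ++ PySem.List.pyGetD rr (i + 1) "") "" cur
  have hloop2 : ∀ (cur : List String),
      (PySem.List.pyRange 0 (cur.length : Int) 1).foldl (fun rl i =>
        if ((PySem.Str.split? (PySem.List.pyGetD rl i "") ";").getD []).length == 1 then
          PySem.List.pySetD rl i (PySem.List.pyGetD rl i "" ++ ";" ++ ua.2)
        else rl) cur
      = cur.map (annStep ua.2) := by
    intro cur
    rw [PySem.List.pyRange_zero_nat, List.foldl_map]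
    simp only [PySem.List.pyGetD_natCast, PySem.List.pySetD_natCast]
    exact foldl_set_range (fun s => ((PySem.Str.split? s ";").getD []).length == 1)
      (fun s => s ++ ";" ++ ua.2) "" cur
  simp only [hinner, hloop2]
  rw [foldl_map_comm]
  simp only [PySem.List.pyRange_zero_nat, List.foldl_map, ← Nat.cast_add_one,
    PySem.List.pyGetD_natCast, range_fold_eq_chain, List.map_map]
  rfl

theorem B_eval (ua : String × String) (rl rr : List String) :
    mapValueResult_alt (ua, (rl, rr))
    = (ua.1, PySem.Str.join "|" (rl.map (fun s =>
        if (nextOf rr s).isSome then s ++ ";" ++ (nextOf rr s).getD ""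
        else if ¬ PySem.Str.isIn ";" s then s ++ ";" ++ ua.2
        else s))) := by
  unfold mapValueResult_alt
  dsimp only
  have hlen : ∀ (l : List String), ((l.length : Int) - 1 - 0).toNat = l.length - 1 := by
    intro l; omega
  rw [PySem.List.pyRange_one, hlen, List.foldl_map]
  simp only [zero_add, ← Nat.cast_add_one, PySem.List.pyGetD_natCast]
  refine Prod.ext rfl ?_
  refine congrArg (PySem.Str.join "|") (List.map_congr_left ?_)
  intro s _
  rw [PySem.Dict.contains_eq_isSome_get?, PySem.Dict.getD_eq_get?_getD, dictfold_get]
  simp [PySem.Dict.get?_empty]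

-- ===== VERDICT (by name: the statement is the Claim_ definition above) =====
theorem mapValueResult_spec : Claim_equal_mapValueResult := by
  intro x _ hpre
  obtain ⟨ua, ir⟩ := x
  obtain ⟨rl, rr⟩ := ir
  unfold Spec_mapValueResult
  rw [A_eval, B_eval]
  refine Prod.ext rfl ?_
  refine congrArg (PySem.Str.join "|") (List.map_congr_left ?_)
  intro s hs
  by_cases hmem : s ∈ rr
  · obtain ⟨hidx, hre⟩ := hpre s hs hmem
    obtain ⟨hch, hnx⟩ := chain_nextOf_of_mem rr s hmem hidx hre
    rw [hch, hnx]
    unfold annStep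
    have hb1 : (((PySem.Str.split? (s ++ ";" ++ rr.getD (rr.idxOf s + 1) "") ";").getD
        []).length == 1) = false := by
      simp only [beq_eq_false_iff_ne, ne_eq]
      exact fun h => ((splitlen_iff _).mp h) (semi_mem_append s _)
    rw [hb1]
    simp
  · rw [chain_of_not_mem rr s hmem, nextOf_none_of_not_mem rr s hmem]
    unfold annStep
    by_cases hsem : ';' ∈ s.toList
    · have h2 : PySem.Str.isIn ";" s = true := (isIn_semi_iff s).mpr hsem
      have hb1 : (((PySem.Str.split? s ";").getD []).length == 1) = false := by
        simp only [beq_eq_false_iff_ne, ne_eq]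
        exact fun h => ((splitlen_iff s).mp h) hsem
      rw [hb1, h2]
      simp
    · have h2 : PySem.Str.isIn ";" s = false := by
        cases hb : PySem.Str.isIn ";" s
        · rfl
        · exact absurd ((isIn_semi_iff s).mp hb) hsem
      have hb1 : (((PySem.Str.split? s ";").getD []).length == 1) = true := by
        simpa [beq_iff_eq] using (splitlen_iff s).mpr hsem
      rw [hb1, h2]
      simp
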